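-- pv_equiv track=rewrite | github.com/semantics-for-personal-health/Personal-Health-Knowledge-Graph | proto_constraint.py | build_time_series_daily
-- ===== SOURCE A (Python) =====
-- def build_time_series_daily(food_set,food_data):
--     series_dict = dict()
--     for food in food_set:
--         food_series = ''
--
--         for day in food_data:
--             food_series += str(int(food in day))
--         series_dict[food] = food_series
--
--     return series_dict
-- ===== SOURCE B (Python) =====
-- def build_time_series_daily(food_set, food_data):
--     # Inverted index: one pass over the data, then one emission pass per food.
--     present = {}
--     for i, day in enumerate(food_data):
--         for f in day:
--             present.setdefault(f, set()).add(i)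
--     n = len(food_data)
--     series_dict = {}
--     for food in food_set:
--         days = present.get(food, ())
--         series_dict[food] = ''.join('1' if i in days else '0' for i in range(n))
--     return series_dict
-- ===== Notes on version B (the rewrite author's own statement) =====
-- stated objective: faster
-- what changed: Replaces the per-food rescan of every day with a single inverted-index pass (food -> set of day indices) followed by an emission pass over range(len(food_data)).
import Mathlib
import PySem

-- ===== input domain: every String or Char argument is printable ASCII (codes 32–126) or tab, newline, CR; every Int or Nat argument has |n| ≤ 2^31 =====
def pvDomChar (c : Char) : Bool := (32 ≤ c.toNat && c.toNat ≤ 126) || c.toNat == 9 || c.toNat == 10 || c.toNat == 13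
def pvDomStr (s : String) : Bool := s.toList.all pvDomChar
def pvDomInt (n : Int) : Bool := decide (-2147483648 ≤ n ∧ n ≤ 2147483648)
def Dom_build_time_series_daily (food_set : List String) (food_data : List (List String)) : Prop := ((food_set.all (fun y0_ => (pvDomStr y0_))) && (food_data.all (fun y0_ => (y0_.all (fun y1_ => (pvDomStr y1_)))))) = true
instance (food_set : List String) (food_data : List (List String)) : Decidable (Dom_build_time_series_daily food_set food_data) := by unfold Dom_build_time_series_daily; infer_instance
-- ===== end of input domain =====

-- B builds an inverted index (food -> set of day indices) in one pass, then emits each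
-- series from it, instead of A's per-food rescan of every day; same return value.

-- ===== PORT A =====
def build_time_series_daily (food_set : List String) (food_data : List (List String)) : List (String × String) :=
  (food_set.foldl (fun sd food =>
      sd.insert food
        (food_data.foldl (fun fs day => fs ++ (if day.contains food then "1" else "0")) ""))
    PySem.Dict.empty).items

-- ===== PORT B =====
-- present = {}; for i, day in enumerate(food_data): for f in day: present.setdefault(f, set()).add(i)
def pvPresent (food_data : List (List String)) : PySem.Dict String (PySem.Set Int) :=
  (PySem.List.enumerate food_data).foldl
    (fun d p => p.2.foldl (fun d f => d.modify f PySem.Set.empty (fun s => PySem.Set.add s p.1)) d)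
    PySem.Dict.empty

def build_time_series_daily_alt (food_set : List String) (food_data : List (List String)) : List (String × String) :=
  let present := pvPresent food_data
  let n : Int := food_data.length
  (food_set.foldl (fun sd food =>
      let days := present.getD food PySem.Set.empty
      sd.insert food
        (PySem.Str.join "" ((PySem.List.pyRange 0 n 1).map
          (fun i => if PySem.Set.contains days i then "1" else "0"))))
    PySem.Dict.empty).items

-- ===== PRECONDITION & SPEC =====
def Spec_build_time_series_daily (food_set : List String) (food_data : List (List String)) (out : List (String × String)) : Prop := out = build_time_series_daily_alt food_set food_data
instance (food_set : List String) (food_data : List (List String)) (out : List (String × String)) : Decidable (Spec_build_time_series_daily food_set food_data out) := by unfold Spec_build_time_series_daily; infer_instance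

-- ===== CLAIM (what is proved, stated in full; the proofs are below) =====
def Claim_equal_build_time_series_daily : Prop := ∀ (food_set : List String) (food_data : List (List String)), Dom_build_time_series_daily food_set food_data → Spec_build_time_series_daily food_set food_data (build_time_series_daily food_set food_data)

-- ===== LEMMAS AND PROOFS =====

-- inner loop of the index build: which indices end up in which set
theorem mem_inner_fold (day : List String) (i0 : Int)
    (d : PySem.Dict String (PySem.Set Int)) (f : String) (i : Int) :
    i ∈ (day.foldl (fun d g => d.modify g PySem.Set.empty (fun s => PySem.Set.add s i0)) d).getD f PySem.Set.empty ↔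
      i ∈ d.getD f PySem.Set.empty ∨ (f ∈ day ∧ i = i0) := by
  induction day generalizing d with
  | nil => simp
  | cons g gs ih =>
    simp only [List.foldl_cons, ih, PySem.Dict.getD_modify, List.mem_cons]
    by_cases h : f = g
    · subst h; simp [PySem.Set.mem_add]; tauto
    · simp [h]

theorem mem_pvPresent_aux (xs : List (List String)) (s : Int)
    (d : PySem.Dict String (PySem.Set Int)) (f : String) (i : Int) :
    i ∈ ((PySem.List.enumerate xs s).foldl
          (fun d p => p.2.foldl (fun d g => d.modify g PySem.Set.empty (fun t => PySem.Set.add t p.1)) d)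
          d).getD f PySem.Set.empty ↔
      i ∈ d.getD f PySem.Set.empty ∨ ∃ (k : Nat) (h : k < xs.length), i = s + k ∧ f ∈ xs[k] := by
  induction xs generalizing s d with
  | nil => simp [PySem.List.enumerate_nil]

  | cons day rest ih =>
    rw [PySem.List.enumerate_cons]
    simp only [List.foldl_cons, ih, mem_inner_fold]
    constructor
    · rintro ((h | ⟨hm, rfl⟩) | ⟨k, hk, rfl, hmem⟩)
      · exact Or.inl h
      · exact Or.inr ⟨0, by simp, by simp, by simpa using hm⟩
      · exact Or.inr ⟨k + 1, by simpa using hk, by push_cast; ring, by simpa using hmem⟩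
    · rintro (h | ⟨k, hk, rfl, hmem⟩)
      · exact Or.inl (Or.inl h)
      · cases k with
        | zero => exact Or.inl (Or.inr ⟨by simpa using hmem, by simp⟩)
        | succ k => exact Or.inr ⟨k, by simpa using hk, by push_cast; ring, by simpa using hmem⟩

theorem mem_pvPresent (xs : List (List String)) (f : String) (i : Int) :
    i ∈ (pvPresent xs).getD f PySem.Set.empty ↔ ∃ (k : Nat) (h : k < xs.length), i = k ∧ f ∈ xs[k] := by
  unfold pvPresent
  rw [mem_pvPresent_aux]
  simp [PySem.Dict.getD_empty, PySem.Set.empty]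

-- A's inner loop, as a list of characters
theorem A_series_data (food : String) (xs : List (List String)) (acc : String) :
    (xs.foldl (fun fs day => fs ++ (if day.contains food then "1" else "0")) acc).toList =
      acc.toList ++ xs.map (fun day => if day.contains food then '1' else '0') := by
  induction xs generalizing acc with
  | nil => simp
  | cons day rest ih =>
    simp only [List.foldl_cons, List.map_cons, ih, String.toList_append]
    by_cases h : food ∈ day <;> simp [h]

-- B's join, as a list of characters
theorem B_series_data (c : Int → Bool) (l : List Int) :
    (PySem.Str.join "" (l.map (fun i => if c i then "1" else "0"))).toList =
      l.map (fun i => if c i then '1' else '0') := by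
  rw [PySem.Str.toList_join]
  have h : (l.map (fun i => if c i then "1" else "0")).map String.toList =
      (l.map (fun i => if c i then '1' else '0')).map (fun ch => [ch]) := by
    simp only [List.map_map]
    exact List.map_congr_left (fun i _ => by by_cases h : c i <;> simp [h])
  rw [h]
  have h2 : ("" : String).toList = [] := rfl
  rw [h2, PySem.Chars.join_nil_singletons]

-- the per-food series computed by A equals the one B emits from the index
theorem series_eq (food : String) (xs : List (List String)) :
    xs.foldl (fun fs day => fs ++ (if day.contains food then "1" else "0")) "" =
      PySem.Str.join "" ((PySem.List.pyRange 0 (xs.length : Int) 1).map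
        (fun i => if PySem.Set.contains ((pvPresent xs).getD food PySem.Set.empty) i then "1" else "0")) := by
  apply String.toList_inj.mp
  rw [A_series_data, B_series_data]
  rw [PySem.List.pyRange_one]
  simp only [List.map_map, Int.sub_zero, Int.toNat_natCast]
  apply List.ext_getElem (by simp)
  intro k h1 h2
  simp only [List.getElem_map, List.getElem_range, Function.comp]
  have hk : k < xs.length := by simpa using h1
  have hmem : PySem.Set.contains ((pvPresent xs).getD food PySem.Set.empty) ((0 : Int) + k) =
      xs[k].contains food := by
    rw [Bool.eq_iff_iff, PySem.Set.contains_iff, mem_pvPresent, List.contains_iff_mem]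
    constructor
    · rintro ⟨k', hk', hik, hmem'⟩
      have hkk : k' = k := by omega
      subst hkk; exact hmem'
    · intro hb; exact ⟨k, hk, by ring, hb⟩
  rw [hmem]
  simp

-- ===== VERDICT (by name: the statement is the Claim_ definition above) =====
theorem build_time_series_daily_spec : Claim_equal_build_time_series_daily := by
  intro food_set food_data _
  unfold Spec_build_time_series_daily build_time_series_daily build_time_series_daily_alt
  congr 1
  apply PySem.List.foldl_congr_mem
  intro sd food _
  rw [series_eq]
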